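-- pv_equiv track=rewrite | github.com/JohnTortugo/Benchmarking | generate_html.py | group_links_by_suite_and_java
-- ===== SOURCE A (Python) =====
-- def group_links_by_suite_and_java(links):
--     """Group links by benchmark suite and Java version."""
--     grouped = {}
--
--     for link in links:
--         suite = link["suite"]
--         java_version = link["java_version"]
--
--         if suite not in grouped:
--             grouped[suite] = {}
--
--         if java_version not in grouped[suite]:
--             grouped[suite][java_version] = []
--
--         grouped[suite][java_version].append(link)
--
--     return grouped
-- ===== SOURCE B (Python) =====
-- def group_links_by_suite_and_java(links):
--     """Group links by benchmark suite and Java version (two flat passes)."""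
--     # Pass 1: flat grouping by suite, preserving original link order.
--     by_suite = {}
--     for link in links:
--         by_suite.setdefault(link["suite"], []).append(link)
--     # Pass 2: for each suite, group its links by java version.
--     return {suite: _group_by_java(suite_links) for suite, suite_links in by_suite.items()}
--
--
-- def _group_by_java(suite_links):
--     by_java = {}
--     for link in suite_links:
--         by_java.setdefault(link["java_version"], []).append(link)
--     return by_java
-- ===== Notes on version B (the rewrite author's own statement) =====
-- stated objective: alternative
-- what changed: Replaces A's single loop with interleaved nested-dict conditional inserts by two flat passes: first group links by suite into a flat dict, then rebuild each suite's list grouped by java version with a reusable one-key grouper.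
import Mathlib
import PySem

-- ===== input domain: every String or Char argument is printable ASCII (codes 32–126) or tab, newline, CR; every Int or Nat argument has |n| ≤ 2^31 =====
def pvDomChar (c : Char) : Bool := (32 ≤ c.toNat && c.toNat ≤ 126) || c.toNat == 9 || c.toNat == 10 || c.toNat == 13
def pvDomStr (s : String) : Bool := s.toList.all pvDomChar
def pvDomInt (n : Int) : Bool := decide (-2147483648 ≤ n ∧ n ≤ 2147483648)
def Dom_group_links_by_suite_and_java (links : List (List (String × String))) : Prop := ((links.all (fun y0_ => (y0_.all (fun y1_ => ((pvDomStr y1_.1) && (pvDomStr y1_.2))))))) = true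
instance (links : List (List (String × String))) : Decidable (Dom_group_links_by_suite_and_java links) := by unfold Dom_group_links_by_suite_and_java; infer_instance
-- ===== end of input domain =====

-- B groups in two flat passes (by suite, then per suite by java version) instead of A's
-- single interleaved nested-dict insertion; objective: alternative decomposition, same cost.

-- shared helper: link[k] for a link given as an association list; Pre_ guarantees the key
-- is present, so the "" fallback is never reached on admitted inputs.
def pvLookup (link : List (String × String)) (k : String) : String :=
  ((PySem.Dict.mk link).get? k).getD ""

-- ===== PORT A =====
-- one step of A's for-loop: nested dict, two conditional inserts, then the append
def pvStepA (grouped : PySem.Dict String (PySem.Dict String (List (List (String × String)))))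
    (link : List (String × String)) :
    PySem.Dict String (PySem.Dict String (List (List (String × String)))) :=
  let suite := pvLookup link "suite"
  let jv := pvLookup link "java_version"
  let g := if grouped.contains suite then grouped else grouped.insert suite PySem.Dict.empty
  let inner := g.getD suite PySem.Dict.empty
  let inner := if inner.contains jv then inner else inner.insert jv []
  g.insert suite (inner.insert jv (inner.getD jv [] ++ [link]))

def group_links_by_suite_and_java (links : List (List (String × String))) :
    List (String × List (String × List (List (String × String)))) :=
  ((links.foldl pvStepA PySem.Dict.empty).items.map (fun p => (p.1, p.2.items)))

-- ===== PORT B =====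
-- flat grouping of a list of links by one key (B's setdefault(...).append loop;
-- d.setdefault(k, []).append(x) sets d[k] = d.get(k, []) + [x], i.e. Dict.modify)
def pvGroupByKey (k : String) (ls : List (List (String × String))) :
    PySem.Dict String (List (List (String × String))) :=
  ls.foldl (fun d link => d.modify (pvLookup link k) [] (· ++ [link])) PySem.Dict.empty

def group_links_by_suite_and_java_alt (links : List (List (String × String))) :
    List (String × List (String × List (List (String × String)))) :=
  (pvGroupByKey "suite" links).items.map
    (fun p => (p.1, (pvGroupByKey "java_version" p.2).items))

-- ===== PRECONDITION & SPEC =====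
-- Pre_: exactly the inputs on which A returns (A raises KeyError when a link lacks
-- the "suite" or "java_version" key).
def Pre_group_links_by_suite_and_java (links : List (List (String × String))) : Prop :=
  ∀ link ∈ links, (PySem.Dict.mk link).contains "suite" = true ∧
    (PySem.Dict.mk link).contains "java_version" = true
instance (links : List (List (String × String))) : Decidable (Pre_group_links_by_suite_and_java links) := by unfold Pre_group_links_by_suite_and_java; infer_instance

def pvWitness_group_links_by_suite_and_java : (List (List (String × String))) :=
  [[("suite", "dacapo"), ("java_version", "11"), ("url", "a.html")],
   [("suite", "dacapo"), ("java_version", "17"), ("url", "b.html")]]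

def Spec_group_links_by_suite_and_java (links : List (List (String × String))) (out : List (String × List (String × List (List (String × String))))) : Prop := out = group_links_by_suite_and_java_alt links
instance (links : List (List (String × String))) (out : List (String × List (String × List (List (String × String))))) : Decidable (Spec_group_links_by_suite_and_java links out) := by
  unfold Spec_group_links_by_suite_and_java
  have h7 : DecidableEq (List (String × List (List (String × String)))) := inferInstance
  have h8 : DecidableEq (String × List (String × List (List (String × String)))) := inferInstance
  have h9 : DecidableEq (List (String × List (String × List (List (String × String))))) := inferInstance
  exact h9 out _

-- ===== CLAIM (what is proved, stated in full; the proofs are below) =====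
def Claim_equal_group_links_by_suite_and_java : Prop := ∀ (links : List (List (String × String))), Dom_group_links_by_suite_and_java links → Pre_group_links_by_suite_and_java links → Spec_group_links_by_suite_and_java links (group_links_by_suite_and_java links)

-- ===== LEMMAS AND PROOFS =====

-- relates B's flat suite dict to A's nested state: group each suite's list by java version
def pvMapVals (d : PySem.Dict String (List (List (String × String)))) :
    PySem.Dict String (PySem.Dict String (List (List (String × String)))) :=
  PySem.Dict.mk (d.items.map (fun p => (p.1, pvGroupByKey "java_version" p.2)))

-- A's two-step update at a key (conditional [] insert, then append-insert) is one modify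
theorem pvStep_collapse {ν : Type} (d : PySem.Dict String (List ν)) (k : String) (x : ν) :
    ((if d.contains k then d else d.insert k []).insert k
      (((if d.contains k then d else d.insert k []).getD k []) ++ [x])) = d.modify k [] (· ++ [x]) := by
  obtain ⟨l⟩ := d
  simp only [PySem.Dict.modify, PySem.Dict.insert, PySem.Dict.contains, PySem.Dict.getD,
    PySem.Dict.get?]
  by_cases h : l.any (fun p => p.1 == k) = true
  · simp [h]
  · rw [Bool.not_eq_true] at h
    have hall : ∀ p ∈ l, ¬ (p.1 == k) = true := List.any_eq_false.mp h
    have hfind : l.find? (fun p => p.1 == k) = none := List.find?_eq_none.mpr hall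
    simp [h, hfind, List.find?_append, List.map_append]
    have : List.map (fun p : String × List ν => if p.1 = k then (k, [x]) else p) l
        = List.map (fun p => p) l :=
      List.map_congr_left (fun p hp => by rw [if_neg (by simpa using hall p hp)])
    rw [this, List.map_id']

theorem pvMapVals_contains (d : PySem.Dict String (List (List (String × String)))) (s : String) :
    (pvMapVals d).contains s = d.contains s := by
  simp [pvMapVals, PySem.Dict.contains, List.any_map, Function.comp_def]

theorem pvMapVals_insert (d : PySem.Dict String (List (List (String × String)))) (s : String)
    (v : List (List (String × String))) :
    (pvMapVals d).insert s (pvGroupByKey "java_version" v) = pvMapVals (d.insert s v) := by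
  obtain ⟨l⟩ := d
  simp only [pvMapVals, PySem.Dict.insert, PySem.Dict.contains, List.any_map, Function.comp_def]
  by_cases h : l.any (fun p => p.1 == s) = true
  · simp only [h, if_true, List.map_map, Function.comp_def]
    refine congrArg PySem.Dict.mk (List.map_congr_left (fun p hp => ?_))
    by_cases hp1 : p.1 = s <;> simp [hp1]
  · rw [Bool.not_eq_true] at h
    simp [h, List.map_append]

theorem pvMapVals_getD (d : PySem.Dict String (List (List (String × String)))) (s : String) :
    (pvMapVals d).getD s PySem.Dict.empty = pvGroupByKey "java_version" (d.getD s []) := by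
  obtain ⟨l⟩ := d
  simp only [pvMapVals, PySem.Dict.getD, PySem.Dict.get?, List.find?_map, Function.comp_def]
  cases hf : l.find? (fun p => p.1 == s)
  · rfl
  · simp

theorem pvGroupByKey_append (k : String) (ls : List (List (String × String)))
    (link : List (String × String)) :
    pvGroupByKey k (ls ++ [link]) = (pvGroupByKey k ls).modify (pvLookup link k) [] (· ++ [link]) := by
  simp [pvGroupByKey, List.foldl_append]

-- one A-step on the mapped state is one flat suite-grouping step on B's state
theorem pvStepA_mapVals (d : PySem.Dict String (List (List (String × String))))
    (link : List (String × String)) :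
    pvStepA (pvMapVals d) link = pvMapVals (d.modify (pvLookup link "suite") [] (· ++ [link])) := by
  simp only [pvStepA]
  have hg : (if (pvMapVals d).contains (pvLookup link "suite") then pvMapVals d
      else (pvMapVals d).insert (pvLookup link "suite") PySem.Dict.empty)
      = pvMapVals (if d.contains (pvLookup link "suite") then d
          else d.insert (pvLookup link "suite") []) := by
    rw [pvMapVals_contains]
    by_cases h : d.contains (pvLookup link "suite")
    · simp [h]
    · simp only [h, Bool.false_eq_true, if_false]
      exact pvMapVals_insert d _ []
  rw [hg, pvMapVals_getD, pvStep_collapse, ← pvGroupByKey_append, pvMapVals_insert,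
    pvStep_collapse]

theorem pvFold_mapVals (ls : List (List (String × String)))
    (d : PySem.Dict String (List (List (String × String)))) :
    ls.foldl pvStepA (pvMapVals d) =
      pvMapVals (ls.foldl (fun d link => d.modify (pvLookup link "suite") [] (· ++ [link])) d) := by
  induction ls generalizing d with
  | nil => rfl
  | cons l t ih => simp [List.foldl_cons, pvStepA_mapVals, ih]

-- ===== VERDICT (by name: the statement is the Claim_ definition above) =====
theorem group_links_by_suite_and_java_spec : Claim_equal_group_links_by_suite_and_java := by
  intro links _ _
  unfold Spec_group_links_by_suite_and_java
  unfold group_links_by_suite_and_java group_links_by_suite_and_java_alt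
  have h0 : (PySem.Dict.empty : PySem.Dict String (PySem.Dict String (List (List (String × String))))) = pvMapVals PySem.Dict.empty := rfl
  rw [h0, pvFold_mapVals]
  simp [pvMapVals, pvGroupByKey, List.map_map, Function.comp_def]
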